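-- pv_equiv track=rewrite | github.com/Natkuma01/CodePath_TIP103 | Unit3/Session1/Version2.py | group_animals_by_habitat
-- ===== SOURCE A (Python) =====
-- def group_animals_by_habitat(habitats):
--     last_index = {}
--
--     for i, value in enumerate(habitats):
--         last_index[value] = i
--
--     res = []
--     start, end = 0, 0
--
--     for i, value in enumerate(habitats):
--         end = max(end, last_index[value])
--         if i == end:
--             res.append(end-start + 1)
--             start = i + 1
--     return res
-- ===== SOURCE B (Python) =====
-- def group_animals_by_habitat(habitats):
--     # Interval-merge formulation: build first/last occurrence tables for each
--     # distinct value, then merge the (first, last) intervals in first-occurrence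
--     # order, emitting the length of each merged interval.
--     first = {}
--     last = {}
--     for i, v in enumerate(habitats):
--         if v not in first:
--             first[v] = i
--         last[v] = i
--     res = []
--     cur = None  # (cur_start, cur_end) of the merged interval being built
--     for v, f in first.items():
--         l = last[v]
--         if cur is None:
--             cur = (f, l)
--         elif f <= cur[1]:
--             cur = (cur[0], max(cur[1], l))
--         else:
--             res.append(cur[1] - cur[0] + 1)
--             cur = (f, l)
--     if cur is not None:
--         res.append(cur[1] - cur[0] + 1)
--     return res
-- ===== Notes on version B (the rewrite author's own statement) =====
-- stated objective: alternative
-- what changed: B replaces A's single stateful scan over positions (running max of last indices with start/end counters) by building first- and last-occurrence tables, forming one (first,last) interval per distinct value in first-occurrence order, and merging overlapping intervals to emit chunk lengths.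
import Mathlib
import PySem

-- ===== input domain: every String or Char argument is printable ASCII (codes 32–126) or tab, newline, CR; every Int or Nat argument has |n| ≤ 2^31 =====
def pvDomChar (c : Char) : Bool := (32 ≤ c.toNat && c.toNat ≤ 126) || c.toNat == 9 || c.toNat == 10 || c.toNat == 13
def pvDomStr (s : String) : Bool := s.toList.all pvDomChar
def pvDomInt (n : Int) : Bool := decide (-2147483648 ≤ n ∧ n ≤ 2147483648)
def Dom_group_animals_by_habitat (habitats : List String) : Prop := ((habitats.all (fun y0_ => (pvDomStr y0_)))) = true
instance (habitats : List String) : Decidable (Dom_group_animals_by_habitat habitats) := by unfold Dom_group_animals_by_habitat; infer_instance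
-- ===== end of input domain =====

-- B builds explicit first/last-occurrence tables and merges the per-value (first, last)
-- intervals in first-occurrence order, instead of A's single position scan with a
-- running max and start/end counters; same asymptotic cost (objective: alternative).

-- ===== PORT A =====
-- loop 'for i, value in enumerate(habitats): last_index[value] = i'
def pvBuildLast (l : List (Int × String)) (d : PySem.Dict String Int) : PySem.Dict String Int :=
  l.foldl (fun d p => d.insert p.2 p.1) d

-- loop 'end = max(end, last_index[value]); if i == end: res.append(end-start+1); start = i+1'
-- state (res, start, end); lv v = last_index[value] (the key is always present, so getD is exact)
def pvLoopA (lv : String → Int) (l : List (Int × String)) (st : List Int × Int × Int) :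
    List Int × Int × Int :=
  l.foldl (fun st p =>
    let e := max st.2.2 (lv p.2)
    if p.1 = e then (st.1 ++ [e - st.2.1 + 1], p.1 + 1, e) else (st.1, st.2.1, e)) st

def group_animals_by_habitat (habitats : List String) : List Int :=
  let last_index := pvBuildLast (PySem.List.enumerate habitats 0) PySem.Dict.empty
  (pvLoopA (fun v => last_index.getD v 0) (PySem.List.enumerate habitats 0) ([], 0, 0)).1

-- ===== PORT B =====
-- loop 'if v not in first: first[v] = i'
def pvBuildFirst (l : List (Int × String)) (d : PySem.Dict String Int) : PySem.Dict String Int :=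
  l.foldl (fun d p => if d.contains p.2 then d else d.insert p.2 p.1) d

-- the interval-merge loop; state (res, cur)
def pvLoopB (l : List (Int × Int)) (st : List Int × Option (Int × Int)) :
    List Int × Option (Int × Int) :=
  l.foldl (fun st q =>
    match st.2 with
    | none => (st.1, some q)
    | some c => if q.1 ≤ c.2 then (st.1, some (c.1, max c.2 q.2))
                else (st.1 ++ [c.2 - c.1 + 1], some q)) st

def pvFinishB (st : List Int × Option (Int × Int)) : List Int :=
  st.1 ++ (match st.2 with | none => [] | some c => [c.2 - c.1 + 1])

def group_animals_by_habitat_alt (habitats : List String) : List Int :=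
  let e := PySem.List.enumerate habitats 0
  let first := pvBuildFirst e PySem.Dict.empty
  let last := pvBuildLast e PySem.Dict.empty
  let intervals := first.items.map (fun q => (q.2, last.getD q.1 0))
  pvFinishB (pvLoopB intervals ([], none))

-- ===== PRECONDITION & SPEC =====
def Spec_group_animals_by_habitat (habitats : List String) (out : List Int) : Prop := out = group_animals_by_habitat_alt habitats
instance (habitats : List String) (out : List Int) : Decidable (Spec_group_animals_by_habitat habitats out) := by unfold Spec_group_animals_by_habitat; infer_instance

-- ===== CLAIM (what is proved, stated in full; the proofs are below) =====
def Claim_equal_group_animals_by_habitat : Prop := ∀ (habitats : List String), Dom_group_animals_by_habitat habitats → Spec_group_animals_by_habitat habitats (group_animals_by_habitat habitats)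

-- ===== LEMMAS AND PROOFS =====

-- index of the last occurrence of v in L (meaningful when v ∈ L)
def pvLastOcc : List String → String → Nat
  | [], _ => 0
  | _ :: t, v => if v ∈ t then pvLastOcc t v + 1 else 0

-- the lookup function both ports draw from the last-occurrence dict
def pvLastv (L : List String) (v : String) : Int :=
  (pvBuildLast (PySem.List.enumerate L 0) PySem.Dict.empty).getD v 0

lemma pvGet_buildLast (L : List String) (s : Int) (d : PySem.Dict String Int) (v : String) :
    (pvBuildLast (PySem.List.enumerate L s) d).get? v =
      if v ∈ L then some (s + (pvLastOcc L v : Int)) else d.get? v := by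
  induction L generalizing s d with
  | nil => simp [pvBuildLast, PySem.List.enumerate_nil]
  | cons x t ih =>
    rw [PySem.List.enumerate_cons]
    show (pvBuildLast (PySem.List.enumerate t (s + 1)) (d.insert x s)).get? v = _
    rw [ih]
    by_cases hvt : v ∈ t
    · simp only [hvt, if_true, List.mem_cons, or_true, pvLastOcc]
      push_cast
      ring_nf
    · by_cases hvx : v = x
      · subst hvx
        simp [hvt, pvLastOcc, PySem.Dict.get?_insert_self]
      · simp [hvt, hvx, PySem.Dict.get?_insert_of_ne _ _ hvx]

lemma pvLastv_eq (L : List String) (v : String) (h : v ∈ L) :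
    pvLastv L v = (pvLastOcc L v : Int) := by
  unfold pvLastv
  rw [PySem.Dict.getD_eq_get?_getD, pvGet_buildLast]
  simp [h]

lemma pvLastOcc_lt (L : List String) (v : String) (h : v ∈ L) : pvLastOcc L v < L.length := by
  induction L with
  | nil => simp at h
  | cons x t ih =>
    by_cases hvt : v ∈ t
    · simpa [pvLastOcc, hvt] using Nat.succ_lt_succ (ih hvt)
    · simp [pvLastOcc, hvt]

lemma pvLe_lastOcc (L : List String) (k : Nat) (hk : k < L.length) : k ≤ pvLastOcc L L[k] := by
  induction L generalizing k with
  | nil => simp at hk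
  | cons x t ih =>
    cases k with
    | zero => exact Nat.zero_le _
    | succ k =>
      have hk' : k < t.length := by simpa using hk
      have hmem : t[k] ∈ t := List.getElem_mem hk'
      simpa [pvLastOcc, hmem] using Nat.succ_le_succ (ih k hk')

-- first-occurrence items of L starting at index s, given which values were already seen
def pvFirstItems : List String → Int → (String → Bool) → List (String × Int)
  | [], _, _ => []
  | x :: t, s, seen =>
      if seen x then pvFirstItems t (s + 1) seen
      else (x, s) :: pvFirstItems t (s + 1) (fun v => v == x || seen v)

lemma pvItems_buildFirst (L : List String) (s : Int) (d : PySem.Dict String Int) :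
    (pvBuildFirst (PySem.List.enumerate L s) d).items = d.items ++ pvFirstItems L s d.contains := by
  induction L generalizing s d with
  | nil => simp [pvBuildFirst, pvFirstItems, PySem.List.enumerate_nil]
  | cons x t ih =>
    rw [PySem.List.enumerate_cons]
    show (pvBuildFirst (PySem.List.enumerate t (s + 1))
        (if d.contains x then d else d.insert x s)).items = _
    by_cases hc : d.contains x = true
    · rw [if_pos hc, ih]
      simp [pvFirstItems, hc]
    · rw [if_neg (by simp [hc]), ih]
      have hitems : (d.insert x s).items = d.items ++ [(x, s)] :=
        PySem.Dict.items_insert_of_not_contains d s (by simp [hc])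
      have hcont : (d.insert x s).contains = fun v => v == x || d.contains v := by
        funext v
        exact PySem.Dict.contains_insert d x v s
      rw [hitems, hcont]
      simp [pvFirstItems, hc, List.append_assoc]

-- the invariant tying A's scan state to B's merge state after k positions
def pvInv (L : List String) (k : Nat) (resA : List Int) (start end_ : Int)
    (resB : List Int) (cur : Option (Int × Int)) : Prop :=
  (∀ j, ∀ _ : j < L.length, j < k → pvLastv L L[j] ≤ end_) ∧
  ((k = 0 ∧ end_ = 0) ∨ (∃ j, ∃ _ : j < L.length, j < k ∧ end_ = pvLastv L L[j])) ∧
  (match cur with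
   | none => k = 0 ∧ resA = [] ∧ resB = [] ∧ start = 0
   | some c => k ≠ 0 ∧
       ((end_ = (k : Int) - 1 ∧ resA = resB ++ [c.2 - c.1 + 1] ∧ c.2 = end_ ∧ start = (k : Int))
        ∨ ((k : Int) - 1 < end_ ∧ resA = resB ∧ c.1 = start ∧ c.2 = end_)))

lemma pvLoopA_cons (lv : String → Int) (i : Int) (v : String) (l : List (Int × String))
    (r : List Int) (a b : Int) :
    pvLoopA lv ((i, v) :: l) (r, a, b) =
      pvLoopA lv l (if i = max b (lv v) then (r ++ [max b (lv v) - a + 1], i + 1, max b (lv v))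
                    else (r, a, max b (lv v))) := rfl

lemma pvLoopB_cons_none (a b : Int) (l : List (Int × Int)) (r : List Int) :
    pvLoopB ((a, b) :: l) (r, none) = pvLoopB l (r, some (a, b)) := rfl

lemma pvLoopB_cons_some (a b : Int) (l : List (Int × Int)) (r : List Int) (c : Int × Int) :
    pvLoopB ((a, b) :: l) (r, some c) =
      pvLoopB l (if a ≤ c.2 then (r, some (c.1, max c.2 b))
                 else (r ++ [c.2 - c.1 + 1], some (a, b))) := rfl

lemma pvFirstItems_cons (x : String) (t : List String) (s : Int) (seen : String → Bool) :
    pvFirstItems (x :: t) s seen =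
      if seen x then pvFirstItems t (s + 1) seen
      else (x, s) :: pvFirstItems t (s + 1) (fun v => v == x || seen v) := rfl

lemma pvMain (L : List String) : ∀ (m k : Nat), k + m = L.length →
    ∀ resA start end_ resB cur, pvInv L k resA start end_ resB cur →
    (pvLoopA (pvLastv L) (PySem.List.enumerate (L.drop k) k) (resA, start, end_)).1 =
      pvFinishB (pvLoopB
        ((pvFirstItems (L.drop k) k (fun v => (L.take k).contains v)).map
          (fun q => (q.2, pvLastv L q.1)))
        (resB, cur)) := by
  intro m
  induction m with
  | zero =>
    intro k hk resA start end_ resB cur hinv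
    have hkn : k = L.length := by omega
    subst hkn
    obtain ⟨hM1, hM2, hcur⟩ := hinv
    rw [List.drop_length]
    cases cur with
    | none =>
      obtain ⟨hk0, hA, hB, _⟩ := hcur
      simp [pvLoopA, pvLoopB, pvFinishB, pvFirstItems, PySem.List.enumerate_nil, hA, hB]
    | some c =>
      obtain ⟨hk0, hcase⟩ := hcur
      have hub : end_ ≤ (L.length : Int) - 1 := by
        rcases hM2 with ⟨h0, _⟩ | ⟨j, hj, _, hend⟩
        · exact absurd h0 hk0
        · have h1 := pvLastOcc_lt L L[j] (List.getElem_mem hj)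
          rw [hend, pvLastv_eq L L[j] (List.getElem_mem hj)]
          omega
      rcases hcase with ⟨_, hA, _, _⟩ | ⟨hlt, _, _, _⟩
      · simp [pvLoopA, pvLoopB, pvFinishB, pvFirstItems, PySem.List.enumerate_nil, hA]
      · exact absurd hlt (by omega)
  | succ m ih =>
    intro k hk resA start end_ resB cur hinv
    have hkL : k < L.length := by omega
    obtain ⟨hM1, hM2, hcur⟩ := hinv
    have hvmem : L[k] ∈ L := List.getElem_mem hkL
    have hlv_ge : (k : Int) ≤ pvLastv L L[k] := by
      rw [pvLastv_eq L L[k] hvmem]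
      exact_mod_cast pvLe_lastOcc L k hkL
    have hseen_le : ∀ w ∈ L.take k, pvLastv L w ≤ end_ := by
      intro w hw
      rw [List.mem_take_iff_getElem] at hw
      obtain ⟨j, hj, he⟩ := hw
      have h := hM1 j (by omega) (by omega)
      rwa [he] at h
    have htake1 : L.take (k + 1) = L.take k ++ [L[k]] := by
      rw [List.take_add_one, List.getElem?_eq_getElem hkL]
      rfl
    have hcast : ((k + 1 : Nat) : Int) = (k : Int) + 1 := by push_cast; ring
    rw [List.drop_eq_getElem_cons hkL, PySem.List.enumerate_cons, pvLoopA_cons,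
      pvFirstItems_cons, ← hcast]
    by_cases hsn : (L.take k).contains L[k] = true
    · -- value already seen: B skips, A's running max is unchanged
      have hsnm : L[k] ∈ L.take k := by rwa [List.contains_iff_mem] at hsn
      have hlv_le : pvLastv L L[k] ≤ end_ := hseen_le _ hsnm
      have hmax : max end_ (pvLastv L L[k]) = end_ := max_eq_left hlv_le
      have hseenfun : (fun v => (L.take k).contains v)
          = (fun v => (L.take (k + 1)).contains v) := by
        funext w
        rw [htake1, Bool.eq_iff_iff]
        simp only [List.contains_iff_mem, List.mem_append, List.mem_singleton]
        constructor
        · exact fun h => Or.inl h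
        · rintro (h | rfl)
          · exact h
          · exact hsnm
      rw [if_pos hsn, hmax, hseenfun]
      cases cur with
      | none =>
        rcases hcur with ⟨hk0, _⟩
        subst hk0
        simp at hsnm
      | some c =>
        rcases hcur with ⟨hk0, hbr⟩
        have hM2' : ∃ j, ∃ _ : j < L.length, j < k + 1 ∧ end_ = pvLastv L L[j] := by
          rcases hM2 with ⟨h0, _⟩ | ⟨j, hj, hjk, he⟩
          · exact absurd h0 hk0
          · exact ⟨j, hj, by omega, he⟩
        have hM1' : ∀ j, ∀ _ : j < L.length, j < k + 1 → pvLastv L L[j] ≤ end_ := by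
          intro j hj hjk
          rcases Nat.lt_succ_iff_lt_or_eq.mp hjk with h | h
          · exact hM1 j hj h
          · subst h; exact hlv_le
        rcases hbr with ⟨hb, _, _, _⟩ | ⟨hlt, hres, hc1, hc2⟩
        · exact absurd hb (by omega)
        · by_cases hbe : (k : Int) = end_
          · rw [if_pos hbe]
            refine ih (k + 1) (by omega) _ _ _ _ _
              ⟨hM1', Or.inr hM2', by omega, Or.inl ⟨by omega, ?_, hc2, rfl⟩⟩
            rw [hres, hc2, hc1]
          · rw [if_neg hbe]
            exact ih (k + 1) (by omega) _ _ _ _ _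
              ⟨hM1', Or.inr hM2', by omega, Or.inr ⟨by omega, hres, hc1, hc2⟩⟩
    · -- first occurrence of the value: B starts/extends an interval
      have hsnm : L[k] ∉ L.take k := by
        intro h
        rw [← List.contains_iff_mem] at h
        exact hsn h
      have hseenfun : (fun v => v == L[k] || (L.take k).contains v)
          = (fun v => (L.take (k + 1)).contains v) := by
        funext w
        rw [htake1, Bool.eq_iff_iff]
        simp only [List.contains_iff_mem, List.mem_append, List.mem_singleton,
          Bool.or_eq_true, beq_iff_eq]
        tauto
      have hmap : (((L[k], (k : Int)).2, pvLastv L (L[k], (k : Int)).1) : Int × Int)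
          = ((k : Int), pvLastv L L[k]) := rfl
      rw [if_neg hsn, hseenfun, List.map_cons, hmap]
      have hM2max : ∀ e', e' = max end_ (pvLastv L L[k]) →
          ∃ j, ∃ _ : j < L.length, j < k + 1 ∧ e' = pvLastv L L[j] := by
        intro e' he'
        rcases max_choice end_ (pvLastv L L[k]) with h | h
        · rw [h] at he'
          rcases hM2 with ⟨h0, hz⟩ | ⟨j, hj, hjk, he⟩
          · refine ⟨k, hkL, by omega, ?_⟩
            have h1 : pvLastv L L[k] ≤ end_ := by rw [← h]; exact le_max_right _ _
            have h2 : (0 : Int) ≤ pvLastv L L[k] := le_trans (Int.natCast_nonneg k) hlv_ge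
            omega
          · exact ⟨j, hj, by omega, by rw [he', he]⟩
        · rw [h] at he'
          exact ⟨k, hkL, by omega, he'⟩
      cases cur with
      | none =>
        obtain ⟨hk0, hA, hB, hst⟩ := hcur
        have hz : end_ = 0 := by
          rcases hM2 with ⟨_, hz⟩ | ⟨j, _, hj0, _⟩
          · exact hz
          · omega
        subst hA hB hst hz
        rw [pvLoopB_cons_none]
        have hmax : max (0 : Int) (pvLastv L L[k]) = pvLastv L L[k] :=
          max_eq_right (by omega)
        rw [hmax]
        by_cases hbe : (k : Int) = pvLastv L L[k]
        · rw [if_pos hbe]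
          refine ih (k + 1) (by omega) _ _ _ _ _
            ⟨?_, Or.inr ⟨k, hkL, by omega, rfl⟩, by omega,
              Or.inl ⟨by omega, ?_, rfl, rfl⟩⟩
          · intro j hj hjk
            have hjeq : j = k := by omega
            subst hjeq
            exact le_refl _
          · show [] ++ [pvLastv L L[k] - 0 + 1] = [] ++ [pvLastv L L[k] - (k : Int) + 1]
            have h0 : (k : Int) = 0 := by omega
            rw [h0]
        · rw [if_neg hbe]
          refine ih (k + 1) (by omega) _ _ _ _ _
            ⟨?_, Or.inr ⟨k, hkL, by omega, rfl⟩, by omega,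
              Or.inr ⟨by omega, rfl, by show (k : Int) = 0; omega, rfl⟩⟩
          intro j hj hjk
          have hjeq : j = k := by omega
          subst hjeq
          exact le_refl _
      | some c =>
        obtain ⟨hk0, hbr⟩ := hcur
        rcases hbr with ⟨hb, hres, hc2, hst⟩ | ⟨hlt, hres, hc1, hc2⟩
        · -- boundary: B closes the previous chunk exactly as A already did
          have hnle : ¬ ((k : Int) ≤ c.2) := by omega
          rw [pvLoopB_cons_some, if_neg hnle]
          have hmax : max end_ (pvLastv L L[k]) = pvLastv L L[k] :=
            max_eq_right (by omega)
          rw [hmax]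
          have hM1' : ∀ j, ∀ _ : j < L.length, j < k + 1 →
              pvLastv L L[j] ≤ pvLastv L L[k] := by
            intro j hj hjk
            rcases Nat.lt_succ_iff_lt_or_eq.mp hjk with h | h
            · exact le_trans (hM1 j hj h) (by omega)
            · subst h; exact le_refl _
          by_cases hbe : (k : Int) = pvLastv L L[k]
          · rw [if_pos hbe]
            refine ih (k + 1) (by omega) _ _ _ _ _
              ⟨hM1', Or.inr ⟨k, hkL, by omega, rfl⟩, by omega,
                Or.inl ⟨by omega, ?_, rfl, rfl⟩⟩
            show resA ++ [pvLastv L L[k] - start + 1]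
              = (resB ++ [c.2 - c.1 + 1]) ++ [pvLastv L L[k] - (k : Int) + 1]
            rw [hres, hst]
          · rw [if_neg hbe]
            exact ih (k + 1) (by omega) _ _ _ _ _
              ⟨hM1', Or.inr ⟨k, hkL, by omega, rfl⟩, by omega,
                Or.inr ⟨by omega, hres, hst.symm, rfl⟩⟩
        · -- open chunk: B merges the new interval into the current one
          have hle : (k : Int) ≤ c.2 := by omega
          rw [pvLoopB_cons_some, if_pos hle, hc1, hc2]
          have hM1' : ∀ j, ∀ _ : j < L.length, j < k + 1 →
              pvLastv L L[j] ≤ max end_ (pvLastv L L[k]) := by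
            intro j hj hjk
            rcases Nat.lt_succ_iff_lt_or_eq.mp hjk with h | h
            · exact le_trans (hM1 j hj h) (le_max_left _ _)
            · subst h; exact le_max_right _ _
          by_cases hbe : (k : Int) = max end_ (pvLastv L L[k])
          · rw [if_pos hbe]
            refine ih (k + 1) (by omega) _ _ _ _ _
              ⟨hM1', Or.inr (hM2max _ rfl), by omega,
                Or.inl ⟨by omega, ?_, rfl, rfl⟩⟩
            show resA ++ [max end_ (pvLastv L L[k]) - start + 1]
              = resB ++ [max end_ (pvLastv L L[k]) - start + 1]
            rw [hres]
          · rw [if_neg hbe]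
            exact ih (k + 1) (by omega) _ _ _ _ _
              ⟨hM1', Or.inr (hM2max _ rfl), by omega,
                Or.inr ⟨by omega, hres, rfl, rfl⟩⟩
  

-- ===== VERDICT (by name: the statement is the Claim_ definition above) =====
theorem group_animals_by_habitat_spec : Claim_equal_group_animals_by_habitat := by
  intro L _
  unfold Spec_group_animals_by_habitat group_animals_by_habitat group_animals_by_habitat_alt
  have hfirst := pvItems_buildFirst L 0 PySem.Dict.empty
  have hcont0 : (PySem.Dict.empty : PySem.Dict String Int).contains
      = (fun v => (L.take 0).contains v) := by
    funext v
    simp [PySem.Dict.contains_empty]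
  rw [hcont0] at hfirst
  have hinv : pvInv L 0 [] 0 0 [] none := by
    refine ⟨fun j _ hj => absurd hj (Nat.not_lt_zero j), Or.inl ⟨rfl, rfl⟩, rfl, rfl, rfl, rfl⟩
  have hmain := pvMain L L.length 0 (by simp) [] 0 0 [] none hinv
  simp only [List.drop_zero] at hmain
  simp only [hfirst, show (PySem.Dict.empty : PySem.Dict String Int).items = [] from rfl, List.nil_append]
  exact hmain
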